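-- pv_equiv track=rewrite | github.com/MastewalB/a2sv-competitive-programming | contest/Contest 5/broken_keyboard.py | broken_keyboard
-- ===== SOURCE A (Python) =====
-- def broken_keyboard(string):
--     response = dict()
--     i = 0
--     while i < len(string):
--         count = 1
--         j = i + 1
--         while j < len(string) and string[j] == string[i]:
--             j += 1
--             count += 1
--         if count < 2 or count % 2 != 0:
--             if not response.get(string[i]):
--                 response[string[i]] = 1
--         i = j
--
--     res = list(response.keys())
--     res.sort()
--     return ''.join(res)
-- ===== SOURCE B (Python) =====
-- def broken_keyboard(string):
--     bad = set()
--     i = 0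
--     n = len(string)
--     while i < n:
--         if i + 1 < n and string[i] == string[i + 1]:
--             i += 2
--         else:
--             bad.add(string[i])
--             i += 1
--     return ''.join(sorted(bad))
-- ===== Notes on version B (the rewrite author's own statement) =====
-- stated objective: simpler
-- what changed: Replaces A's run-length counting with parity test and dict bookkeeping by local pair cancellation: adjacent equal characters are consumed two at a time, so a character is collected exactly when it is the unpaired survivor of an odd-length run; no run lengths, counts, parity tests or dict are ever computed.
import Mathlib
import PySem

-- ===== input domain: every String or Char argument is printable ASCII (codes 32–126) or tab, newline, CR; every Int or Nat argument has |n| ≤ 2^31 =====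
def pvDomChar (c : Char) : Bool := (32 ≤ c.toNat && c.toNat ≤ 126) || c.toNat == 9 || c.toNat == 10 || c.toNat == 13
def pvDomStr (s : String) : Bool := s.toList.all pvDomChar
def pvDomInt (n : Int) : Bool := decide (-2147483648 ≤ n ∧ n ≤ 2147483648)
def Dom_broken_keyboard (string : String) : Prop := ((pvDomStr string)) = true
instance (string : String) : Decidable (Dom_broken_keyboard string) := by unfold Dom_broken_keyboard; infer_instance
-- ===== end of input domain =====

-- B replaces A's run-length counting + parity test + dict with local pair cancellation
-- (adjacent equal characters consumed in pairs; the unpaired survivor of an odd run is collected); objective: simpler.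

-- ===== PORT A =====
-- inner while loop: 'while j < len and string[j] == string[i]'; the suffix starting at j
-- is carried instead of the index j (same state, the obvious structural recursion)
def bkInner (c : Char) (count : Nat) : List Char → Nat × List Char
  | [] => (count, [])
  | x :: rest => if x == c then bkInner c (count + 1) rest else (count, x :: rest)

lemma bkInner_len (c : Char) : ∀ (l : List Char) (count : Nat), (bkInner c count l).2.length ≤ l.length := by
  intro l
  induction l with
  | nil => intro n; simp [bkInner]
  | cons x xs ih =>
    intro n
    by_cases h : x == c
    · simpa [bkInner, h] using Nat.le_succ_of_le (ih (n + 1))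
    · simp [bkInner, h]

-- outer while loop: i is carried as the suffix starting at i; response is the dict
def bkOuter (resp : PySem.Dict Char Int) : List Char → PySem.Dict Char Int
  | [] => resp
  | c :: rest =>
    bkOuter
      (if (bkInner c 1 rest).1 < 2 ∨ (bkInner c 1 rest).1 % 2 ≠ 0 then
        (if ((resp.get? c).getD 0 == 0) then resp.insert c 1 else resp)
       else resp)
      (bkInner c 1 rest).2
termination_by l => l.length
decreasing_by
  simpa using Nat.lt_succ_of_le (bkInner_len c rest 1)

def broken_keyboard (string : String) : String :=
  String.mk (PySem.List.sorted (PySem.Dict.keys (bkOuter PySem.Dict.empty string.toList)) (fun x => x) false)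

-- ===== PORT B =====
-- the while loop of Source B: i is carried as the suffix starting at i; 'i + 1 < n and
-- string[i] == string[i+1]' is the two-element pattern match on that suffix
def bkScan (bad : PySem.Set Char) : List Char → PySem.Set Char
  | [] => bad
  | [x] => bkScan (PySem.Set.add bad x) []
  | x :: y :: rest2 => if x == y then bkScan bad rest2 else bkScan (PySem.Set.add bad x) (y :: rest2)
termination_by l => l.length

def broken_keyboard_alt (string : String) : String :=
  String.mk (PySem.List.sorted (bkScan PySem.Set.empty string.toList) (fun x => x) false)

-- ===== PRECONDITION & SPEC =====
def Spec_broken_keyboard (string : String) (out : String) : Prop := out = broken_keyboard_alt string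
instance (string : String) (out : String) : Decidable (Spec_broken_keyboard string out) := by unfold Spec_broken_keyboard; infer_instance

-- ===== CLAIM (what is proved, stated in full; the proofs are below) =====
def Claim_equal_broken_keyboard : Prop := ∀ (string : String), Dom_broken_keyboard string → Spec_broken_keyboard string (broken_keyboard string)

-- ===== LEMMAS AND PROOFS =====

lemma bkInner_eq (c : Char) : ∀ (l : List Char) (n : Nat),
    bkInner c n l = (n + (l.takeWhile (· == c)).length, l.dropWhile (· == c)) := by
  intro l
  induction l with
  | nil => intro n; simp [bkInner]
  | cons x xs ih =>
    intro n
    by_cases h : x == c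
    · simp [bkInner, h, ih]
      omega
    · simp [bkInner, h]

-- pair cancellation over one maximal run: a run of length m leaves its character
-- in the set exactly when m is odd
lemma bkScan_run : ∀ (m : Nat) (S : PySem.Set Char) (c : Char) (r : List Char),
    (∀ y ys, r = y :: ys → y ≠ c) →
    bkScan S (List.replicate m c ++ r) = bkScan (if m % 2 = 1 then PySem.Set.add S c else S) r := by
  intro m
  induction m using Nat.strong_induction_on with
  | _ m ih =>
    intro S c r hr
    match m with
    | 0 => simp
    | 1 =>
      cases r with
      | nil => simp [bkScan]
      | cons y ys =>
        have hy : (c == y) = false := by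
          simpa using (Ne.symm (hr y ys rfl))
        simp [bkScan, hy]
    | (k + 2) =>
      have hrepl : List.replicate (k + 2) c ++ r = c :: c :: (List.replicate k c ++ r) := by
        simp [List.replicate_succ]
      rw [hrepl]
      cases hcase : List.replicate k c ++ r with
      | nil =>
        rcases List.append_eq_nil_iff.mp hcase with ⟨h1, h2⟩
        have hk0 : k = 0 := by simpa using congrArg List.length h1
        subst hk0; subst h2
        simp [bkScan]
      | cons z zs =>
        rw [show bkScan S (c :: c :: (z :: zs)) = bkScan S (z :: zs) by simp [bkScan]]
        rw [← hcase, ih k (by omega) S c r hr]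
        have h2 : (k + 2) % 2 = k % 2 := by omega
        rw [h2]

lemma dropWhile_head (p : Char → Bool) : ∀ (l : List Char) (y : Char) (ys : List Char),
    l.dropWhile p = y :: ys → p y = false := by
  intro l
  induction l with
  | nil => intro y ys h; simp [List.dropWhile] at h
  | cons x xs ih =>
    intro y ys h
    by_cases hx : p x
    · exact ih y ys (by simpa [List.dropWhile_cons, hx] using h)
    · rw [List.dropWhile_cons, if_neg hx] at h
      cases h
      simpa using hx

lemma bk_main : ∀ (n : Nat) (l : List Char), l.length ≤ n →
    ∀ (d : PySem.Dict Char Int) (S : PySem.Set Char),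
    (∀ x, x ∈ d.keys ↔ x ∈ S) → (∀ x v, d.get? x = some v → v = 1) →
    ∀ x, x ∈ (bkOuter d l).keys ↔ x ∈ bkScan S l := by
  intro n
  induction n with
  | zero =>
    intro l hl d S hmem hval x
    have : l = [] := List.eq_nil_of_length_eq_zero (Nat.le_zero.mp hl)
    subst this
    simpa [bkOuter, bkScan] using hmem x
  | succ n ih =>
    intro l hl d S hmem hval x
    cases l with
    | nil => simpa [bkOuter, bkScan] using hmem x
    | cons c rest =>
      set tw := rest.takeWhile (· == c) with htw
      set r' := rest.dropWhile (· == c) with hr'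
      have htwc : ∀ y ∈ tw, y = c := by
        intro y hy
        have := List.mem_takeWhile_imp hy
        simpa [htw] using (by simpa using this : (y == c) = true)
      set k := tw.length with hk
      have htwrepl : tw = List.replicate k c := List.eq_replicate_of_mem htwc
      -- the updated dict / set after this run
      set d' := (if (1 + k) < 2 ∨ (1 + k) % 2 ≠ 0 then
          (if ((d.get? c).getD 0 == 0) then d.insert c 1 else d) else d) with hd'
      set S' := (if (1 + k) % 2 = 1 then PySem.Set.add S c else S) with hS'
      -- LHS unfolds to bkOuter d' r'
      have hL : bkOuter d (c :: rest) = bkOuter d' r' := by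
        rw [bkOuter, bkInner_eq]
      -- RHS: pair cancellation through the whole run
      have hsplit : c :: rest = List.replicate (1 + k) c ++ r' := by
        have : rest = tw ++ r' := (List.takeWhile_append_dropWhile ..).symm
        rw [this, htwrepl]
        simp [Nat.add_comm 1 k, List.replicate_succ]
      have hrhead : ∀ y ys, r' = y :: ys → y ≠ c := by
        intro y ys hcons
        have := dropWhile_head (· == c) rest y ys (by rw [← hr', hcons])
        simpa using this
      have hR : bkScan S (c :: rest) = bkScan S' r' := by
        rw [hsplit, bkScan_run (1 + k) S c r' hrhead, hS']
      -- correspondence for d' and S'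
      have hmem' : ∀ y, y ∈ d'.keys ↔ y ∈ S' := by
        intro y
        by_cases hodd : (1 + k) % 2 = 1
        · have hS'' : S' = PySem.Set.add S c := by simp [hS', hodd]
          have hd'' : d' = (if ((d.get? c).getD 0 == 0) then d.insert c 1 else d) := by
            simp [hd', hodd]
          rw [hS'', hd'']
          rcases hoc : d.get? c with _ | v
          · simp [PySem.Dict.mem_keys_insert, PySem.Set.mem_add, ← hmem]
            tauto
          · have hv : v = 1 := hval c v hoc
            have hcmem : c ∈ d.keys := by
              by_contra hcn
              rw [← PySem.Dict.get?_eq_none_iff_not_mem_keys] at hcn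
              simp [hcn] at hoc
            simp [hv, PySem.Set.mem_add, ← hmem]
            intro h; rw [h]; exact hcmem
        · have h1 : ¬ ((1 + k) < 2 ∨ (1 + k) % 2 ≠ 0) := by omega
          rw [hd', if_neg h1, hS', if_neg hodd]
          exact hmem y
      have hval' : ∀ y v, d'.get? y = some v → v = 1 := by
        intro y v hy
        rw [hd'] at hy
        split at hy
        · split at hy
          · rw [PySem.Dict.get?_insert] at hy
            split at hy
            · simpa using hy.symm
            · exact hval y v hy
          · exact hval y v hy
        · exact hval y v hy
      have hlen : r'.length ≤ n := by
        have h1 : r'.length ≤ rest.length := by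
          rw [hr']; exact List.length_dropWhile_le ..
        simp at hl; omega
      rw [hL, hR]
      exact ih r' hlen d' S' hmem' hval' x

lemma bkOuter_nodup : ∀ (n : Nat) (l : List Char), l.length ≤ n →
    ∀ (d : PySem.Dict Char Int), d.keys.Nodup → (bkOuter d l).keys.Nodup := by
  intro n
  induction n with
  | zero =>
    intro l hl d hd
    have : l = [] := List.eq_nil_of_length_eq_zero (Nat.le_zero.mp hl)
    subst this; simpa [bkOuter] using hd
  | succ n ih =>
    intro l hl d hd
    cases l with
    | nil => simpa [bkOuter] using hd
    | cons c rest =>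
      rw [bkOuter]
      have hlen : (bkInner c 1 rest).2.length ≤ n := by
        have := bkInner_len c rest 1
        simp at hl; omega
      apply ih _ hlen
      split
      · split
        · exact PySem.Dict.nodup_keys_insert _ _ _ hd
        · exact hd
      · exact hd

lemma bkScan_nodup : ∀ (n : Nat) (l : List Char), l.length ≤ n →
    ∀ (S : PySem.Set Char), S.Nodup → (bkScan S l).Nodup := by
  intro n
  induction n with
  | zero =>
    intro l hl S hS
    have : l = [] := List.eq_nil_of_length_eq_zero (Nat.le_zero.mp hl)
    subst this; simpa [bkScan] using hS
  | succ n ih =>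
    intro l hl S hS
    cases l with
    | nil => simpa [bkScan] using hS
    | cons x rest =>
      cases rest with
      | nil =>
        simpa [bkScan] using PySem.Set.nodup_add _ _ hS
      | cons y rest2 =>
        by_cases hxy : (x == y) = true
        · rw [show bkScan S (x :: y :: rest2) = bkScan S rest2 by simp [bkScan, hxy]]
          exact ih rest2 (by simp at hl; omega) S hS
        · rw [show bkScan S (x :: y :: rest2) = bkScan (PySem.Set.add S x) (y :: rest2) by
            simp [bkScan, hxy]]
          exact ih (y :: rest2) (by simp at hl ⊢; omega) _ (PySem.Set.nodup_add _ _ hS)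

-- ===== VERDICT (by name: the statement is the Claim_ definition above) =====
theorem broken_keyboard_spec : Claim_equal_broken_keyboard := by
  intro s _
  unfold Spec_broken_keyboard broken_keyboard broken_keyboard_alt
  congr 1
  apply PySem.List.sorted_eq_sorted_of_perm
  · exact fun a b h => h
  · have hmem := bk_main s.toList.length s.toList le_rfl PySem.Dict.empty PySem.Set.empty
      (by simp [PySem.Dict.keys_empty, PySem.Set.empty]) (by simp [PySem.Dict.get?_empty])
    have hA : (bkOuter PySem.Dict.empty s.toList).keys.Nodup :=
      bkOuter_nodup s.toList.length s.toList le_rfl _ PySem.Dict.nodup_keys_empty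
    have hB : (bkScan PySem.Set.empty s.toList).Nodup :=
      bkScan_nodup s.toList.length s.toList le_rfl _ (by simp [PySem.Set.empty])
    exact (List.perm_ext_iff_of_nodup hA hB).mpr hmem
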